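-- pv_equiv track=rewrite | github.com/EchoUA/ivan_test | text_analyzer/views.py | for_print
-- ===== SOURCE A (Python) =====
-- import string
--
-- def for_print(words_list):
--     if len(words_list) > 25:
--         k = len(words_list) // 25
--         for_index = 0
--         for j in range(k+1):
--             for i, alpha in enumerate(string.ascii_lowercase):
--                 if i+for_index >= len(words_list):
--                     break
--                 words_list[i+for_index] = [alpha*(j+1) + '.'] + [words_list[i+for_index]]
--             for_index = for_index +  i + 1
--     else:
--         for i, alpha in enumerate(string.ascii_lowercase):
--             if i >= len(words_list):
--                 break
--             words_list[i] = [alpha +'.'] +  [words_list[i]]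
--
--     return words_list
-- ===== SOURCE B (Python) =====
-- import string
--
-- def for_print(words_list):
--     for n in range(len(words_list)):
--         letter = string.ascii_lowercase[n % 26]
--         words_list[n] = [letter * (n // 26 + 1) + '.', words_list[n]]
--     return words_list
-- ===== Notes on version B (the rewrite author's own statement) =====
-- stated objective: simpler
-- what changed: Replaces the two-branch structure (blocks of 26 with a for_index accumulator and break, plus a separate small-list loop) by one flat loop computing each label in closed form from the index via n % 26 and n // 26.
import Mathlib
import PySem

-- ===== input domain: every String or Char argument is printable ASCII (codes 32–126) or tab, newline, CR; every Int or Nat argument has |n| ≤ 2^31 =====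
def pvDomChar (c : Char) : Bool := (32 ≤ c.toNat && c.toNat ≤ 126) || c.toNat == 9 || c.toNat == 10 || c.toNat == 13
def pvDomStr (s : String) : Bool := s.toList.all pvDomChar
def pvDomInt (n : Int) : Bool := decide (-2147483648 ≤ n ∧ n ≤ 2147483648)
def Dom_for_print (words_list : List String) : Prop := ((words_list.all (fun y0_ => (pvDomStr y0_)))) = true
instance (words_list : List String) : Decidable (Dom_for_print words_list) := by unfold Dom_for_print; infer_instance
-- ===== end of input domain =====

-- B replaces A's blocks-of-26/for_index/break structure by one flat loop with a closed-form
-- label from the index (objective: simpler). Both Pythons mutate words_list in place identically;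
-- the theorems are about the returned value.

-- ===== PORT A =====
def lowerA : List Char := "abcdefghijklmnopqrstuvwxyz".toList

-- enumerate(string.ascii_lowercase), with a start index for the recursion
def enumFromA : Nat → List Char → List (Nat × Char)
  | _, [] => []
  | k, c :: cs => (k, c) :: enumFromA (k+1) cs

-- inner loop of the len>25 branch; state = (processed prefix, remaining words);
-- returns also Python's final value of i (break index, or 25 when the loop completes).
-- The `rest = []` arm under the else is unreachable when `len` is the true length.
def innerA (len j forIndex : Nat) :
    List (Nat × Char) → List (List String) → List String →
    (List (List String) × List String × Nat)
  | [], acc, rest => (acc, rest, 25)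
  | (i, alpha) :: ps, acc, rest =>
    if i + forIndex ≥ len then (acc, rest, i)
    else
      match rest with
      | [] => (acc, [], i)
      | w :: rest' =>
          innerA len j forIndex ps
            (acc ++ [[String.mk (List.replicate (j+1) alpha) ++ ".", w]]) rest'

-- outer loop `for j in range(k+1)`; the trailing `rest` is empty on every real run,
-- the `.map` only restores the type in that unreachable leftover case.
def outerA (len : Nat) : List Nat → Nat → List (List String) → List String → List (List String)
  | [], _, acc, rest => acc ++ rest.map (fun w => [w])
  | j :: js, forIndex, acc, rest =>
      let r := innerA len j forIndex (enumFromA 0 lowerA) acc rest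
      outerA len js (forIndex + r.2.2 + 1) r.1 r.2.1

-- the len<=25 branch
def smallA (len : Nat) : List (Nat × Char) → List (List String) → List String → List (List String)
  | [], acc, rest => acc ++ rest.map (fun w => [w])
  | (i, alpha) :: ps, acc, rest =>
    if i ≥ len then acc ++ rest.map (fun w => [w])
    else
      match rest with
      | [] => acc
      | w :: rest' =>
          smallA len ps (acc ++ [[String.mk [alpha] ++ ".", w]]) rest'

def for_print (words_list : List String) : List (List String) :=
  if words_list.length > 25 then
    let k := words_list.length / 25
    outerA words_list.length (List.range (k+1)) 0 [] words_list
  else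
    smallA words_list.length (enumFromA 0 lowerA) [] words_list

-- ===== PORT B =====
def lowerB : List Char := "abcdefghijklmnopqrstuvwxyz".toList

-- the flat loop of Source B: index n travels with the recursion
def altGo : Nat → List String → List (List String)
  | _, [] => []
  | n, w :: ws =>
      [String.mk (List.replicate (n / 26 + 1) (lowerB.getD (n % 26) ' ')) ++ ".", w] :: altGo (n+1) ws

def for_print_alt (words_list : List String) : List (List String) := altGo 0 words_list

-- ===== PRECONDITION & SPEC =====
def Spec_for_print (words_list : List String) (out : List (List String)) : Prop := out = for_print_alt words_list
instance (words_list : List String) (out : List (List String)) : Decidable (Spec_for_print words_list out) := by unfold Spec_for_print; infer_instance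

-- ===== CLAIM (what is proved, stated in full; the proofs are below) =====
def Claim_equal_for_print : Prop := ∀ (words_list : List String), Dom_for_print words_list → Spec_for_print words_list (for_print words_list)

-- ===== LEMMAS AND PROOFS =====

theorem lowerB_eq : lowerB = lowerA := rfl

theorem altGo_cons (n : Nat) (w : String) (ws : List String) :
    altGo n (w :: ws) =
      [String.mk (List.replicate (n / 26 + 1) (lowerB.getD (n % 26) ' ')) ++ ".", w] :: altGo (n+1) ws := rfl

theorem altGo_length (n : Nat) (ws : List String) : (altGo n ws).length = ws.length := by
  induction ws generalizing n with
  | nil => rfl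
  | cons w ws ih => simp [altGo, ih]

theorem altGo_append (n : Nat) (t d : List String) :
    altGo n (t ++ d) = altGo n t ++ altGo (n + t.length) d := by
  induction t generalizing n with
  | nil => simp [altGo]
  | cons w t ih => simp [altGo, ih]; ring_nf

theorem lowerA_drop (i : Nat) (h : i < 26) :
    lowerA.drop i = (lowerA.getD i ' ') :: lowerA.drop (i+1) := by
  interval_cases i <;> rfl

theorem smallA_lem (rest : List String) :
    ∀ (i : Nat) (acc : List (List String)),
      acc.length = i → acc.length + rest.length ≤ 25 →
      smallA (acc.length + rest.length) (enumFromA i (lowerA.drop i)) acc rest =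
        acc ++ altGo i rest := by
  induction rest with
  | nil =>
    intro i acc hi hlen
    have h26 : i < 26 := by omega
    rw [lowerA_drop i h26]
    simp only [enumFromA, smallA, List.length_nil, Nat.add_zero, altGo]
    rw [if_pos (by omega)]
    simp
  | cons w rest' ih =>
    intro i acc hi hlen
    have h26 : i < 26 := by omega
    rw [lowerA_drop i h26]
    simp only [enumFromA, smallA]
    rw [if_neg (by simp; omega)]
    have hacc' : (acc ++ [[String.mk [lowerA.getD i ' '] ++ ".", w]]).length = i + 1 := by
      simp [hi]
    have := ih (i+1) (acc ++ [[String.mk [lowerA.getD i ' '] ++ ".", w]]) hacc'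
      (by simp at hlen ⊢; omega)
    rw [hacc'] at this
    have hlen2 : acc.length + (w :: rest').length = (i + 1) + rest'.length := by
      simp [hi]; omega
    rw [hlen2, this, altGo_cons]
    have hd : i / 26 = 0 := Nat.div_eq_of_lt h26
    have hm : i % 26 = i := Nat.mod_eq_of_lt h26
    simp [hd, hm, lowerB_eq, List.replicate]

theorem innerA_lem (len j : Nat) (rest : List String) :
    ∀ (i : Nat) (acc : List (List String)),
      i ≤ 26 → acc.length = 26 * j + i → len = acc.length + rest.length →
      innerA len j (26 * j) (enumFromA i (lowerA.drop i)) acc rest =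
        (acc ++ altGo acc.length (rest.take (26 - i)), rest.drop (26 - i),
          if rest.length < 26 - i then i + rest.length else 25) := by
  induction rest with
  | nil =>
    intro i acc hi hacc hlen
    simp only [List.length_nil, Nat.add_zero] at hlen
    by_cases h26 : i < 26
    · rw [lowerA_drop i h26]
      simp only [enumFromA, innerA]
      rw [if_pos (by omega)]
      simp [altGo]
      omega
    · have : i = 26 := by omega
      subst this
      have hld : lowerA.drop 26 = [] := rfl
      rw [hld]
      simp [enumFromA, innerA, altGo]
  | cons w rest' ih =>
    intro i acc hi hacc hlen
    by_cases h26 : i < 26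
    · rw [lowerA_drop i h26]
      simp only [enumFromA, innerA]
      rw [if_neg (by simp at hlen ⊢; omega)]
      have hacc' : (acc ++ [[String.mk (List.replicate (j+1) (lowerA.getD i ' ')) ++ ".", w]]).length
          = 26 * j + (i + 1) := by simp [hacc]; omega
      have hrec := ih (i+1) (acc ++ [[String.mk (List.replicate (j+1) (lowerA.getD i ' ')) ++ ".", w]])
        (by omega) hacc' (by simp at hlen ⊢; omega)
      rw [hrec]
      have ht : (26 : Nat) - i = (26 - (i+1)) + 1 := by omega
      have htake : (w :: rest').take (26 - i) = w :: rest'.take (26 - (i+1)) := by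
        rw [ht]; rfl
      have hdrop : (w :: rest').drop (26 - i) = rest'.drop (26 - (i+1)) := by
        rw [ht]; rfl
      rw [htake, hdrop, altGo_cons]
      have hd : acc.length / 26 = j := by omega
      have hm : acc.length % 26 = i := by omega
      simp only [Prod.mk.injEq]
      refine ⟨?_, by trivial, ?_⟩
      · rw [hacc', hd, hm, lowerB_eq, hacc]
        simp [List.append_assoc, Nat.add_assoc]
      · simp only [List.length_cons]
        split_ifs with h1 h2 h2 <;> omega
    · have : i = 26 := by omega
      subst this
      have hld : lowerA.drop 26 = [] := rfl
      rw [hld]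
      simp [enumFromA, innerA, altGo]
  termination_by rest.length

theorem innerA_break0 (len j fi : Nat) (acc : List (List String)) (rest : List String)
    (h : fi ≥ len) : innerA len j fi (enumFromA 0 lowerA) acc rest = (acc, rest, 0) := by
  have : lowerA = 'a' :: lowerA.drop 1 := rfl
  rw [this]
  simp only [enumFromA, innerA]
  rw [if_pos (by omega)]

theorem outer_done (len : Nat) (js : List Nat) :
    ∀ (fi : Nat) (acc : List (List String)), fi ≥ len →
      outerA len js fi acc [] = acc := by
  induction js with
  | nil => intro fi acc h; simp [outerA]
  | cons j js ih =>
    intro fi acc h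
    simp only [outerA, innerA_break0 len j fi acc [] h]
    exact ih (fi + 0 + 1) acc (by omega)

theorem outerA_lem (len : Nat) (m : Nat) :
    ∀ (j : Nat) (acc : List (List String)) (rest : List String),
      acc.length = 26 * j → len = acc.length + rest.length → rest.length ≤ 26 * m →
      outerA len (List.range' j m) (26 * j) acc rest = acc ++ altGo acc.length rest := by
  induction m with
  | zero =>
    intro j acc rest hacc hlen hm
    have : rest = [] := by
      cases rest with
      | nil => rfl
      | cons a b => simp at hm
    subst this
    simp [List.range', outerA, altGo]
  | succ m ih =>
    intro j acc rest hacc hlen hm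
    rw [List.range'_succ]
    simp only [outerA]
    have hin := innerA_lem len j rest 0 acc (by omega) (by omega) hlen
    simp only [Nat.sub_zero, List.drop_zero] at hin
    rw [hin]
    by_cases hr : rest.length < 26
    · -- block consumes the whole rest; remaining blocks do nothing
      have hdrop : rest.drop 26 = [] := by
        apply List.drop_eq_nil_of_le; omega
      have htake : rest.take 26 = rest := List.take_of_length_le (by omega)
      simp only [if_pos hr, hdrop, htake]
      exact outer_done len (List.range' (j+1) m) (26 * j + (0 + rest.length) + 1)
        (acc ++ altGo acc.length rest) (by omega)
    · -- full block of 26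
      simp only [if_neg hr]
      have hacc' : (acc ++ altGo acc.length (rest.take 26)).length = 26 * (j+1) := by
        simp [altGo_length, hacc]
        have : (rest.take 26).length = 26 := by simp; omega
        omega
      have hfi : 26 * j + 25 + 1 = 26 * (j+1) := by omega
      rw [hfi]
      have hrec := ih (j+1) (acc ++ altGo acc.length (rest.take 26)) (rest.drop 26)
        hacc' (by simp [hacc']; omega) (by simp; omega)
      rw [hrec, hacc']
      have : rest = rest.take 26 ++ rest.drop 26 := (List.take_append_drop 26 rest).symm
      conv_rhs => rw [this]
      rw [altGo_append, List.append_assoc]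
      congr 2
      · congr 1
        simp; omega

-- ===== VERDICT (by name: the statement is the Claim_ definition above) =====
theorem for_print_spec : Claim_equal_for_print := by
  intro ws _
  unfold Spec_for_print for_print for_print_alt
  by_cases h : ws.length > 25
  · rw [if_pos h]
    have hcov : ws.length ≤ 26 * (ws.length / 25 + 1) := by omega
    have := outerA_lem ws.length (ws.length / 25 + 1) 0 [] ws (by simp) (by simp) hcov
    simpa [List.range_eq_range'] using this
  · rw [if_neg h]
    have := smallA_lem ws 0 [] rfl (by simp; omega)
    simpa using this

-- end of file
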